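-- pv_equiv track=rewrite | github.com/SamarthMahendra/breastcancerwisconsin-classifcation | test.py | iterative_dp
-- ===== SOURCE A (Python) =====
-- MOD = 10 ** 9 + 7
--
-- def iterative_dp(src, target, k):
--     n = len(src)
--
--     # Edge case: If target length doesn't match src length, return 0.
--     if len(target) != n:
--         return 0
--
--     # Preprocessing: Count frequency of each permutation in `src`.
--     l = list(src)
--     s = {}
--     for i in range(len(src)):
--         w = ''.join(l)
--         if w not in s:
--             s[w] = 0
--         s[w] += 1
--         # Rotate the list to generate the next permutation.
--         x = l.pop(0)
--         l.append(x)
--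
--     # Initialize the DP table: dp[k][state] -> number of ways to reach `state` in `k` steps.
--     dp = [[0] * (len(s) + 1) for _ in range(k + 1)]
--
--     # Base case: 1 way to start from `src` at step 0.
--     dp[0][0] = 1  # Assuming `src` maps to index 0.
--
--     # Mapping of states to their respective indices in `s`.
--     state_to_index = {state: idx for idx, state in enumerate(s.keys())}
--
--     # Fill the DP table iteratively.
--     for step in range(1, k + 1):
--         for curr_state, curr_idx in state_to_index.items():
--             for next_state, count in s.items():
--                 next_idx = state_to_index[next_state]
--
--                 # Accumulate the ways modulo MOD.
--                 dp[step][next_idx] += dp[step - 1][curr_idx] * count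
--                 dp[step][next_idx] %= MOD
--
--     # Return the answer: Number of ways to reach `target` in exactly `k` steps.
--     target_idx = state_to_index.get(target, -1)
--     if target_idx == -1:
--         return 0  # Target state not found.
--     return dp[k][target_idx]
-- ===== SOURCE B (Python) =====
-- MOD = 10 ** 9 + 7
--
-- def iterative_dp(src, target, k):
--     # Closed form: from any state, one step reaches state j in count(j) ways,
--     # so paths(k, target) = count(target) * n^(k-1); k == 0 is the trivial path.
--     n = len(src)
--     if len(target) != n:
--         return 0
--     if k == 0:
--         return 1 if target == src else 0
--     cnt = 0
--     for i in range(n):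
--         if src[i:] + src[:i] == target:
--             cnt += 1
--     return cnt * pow(n, k - 1, MOD) % MOD
-- ===== Notes on version B (the rewrite author's own statement) =====
-- stated objective: faster
-- what changed: Replaces the O(k*n^2) DP over rotation states by the closed form count(target-as-rotation) * n^(k-1) mod 1e9+7 computed with built-in modular fast exponentiation (k=0 handled directly).
-- intended difference: On the single input src='' , target='', k=0, A returns 0 (its empty rotation dict never contains the start state) while B returns 1, the intended count of the empty path from src to target=src. — e.g. on iterative_dp("", "", 0): A returns 0, B returns 1
import Mathlib
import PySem

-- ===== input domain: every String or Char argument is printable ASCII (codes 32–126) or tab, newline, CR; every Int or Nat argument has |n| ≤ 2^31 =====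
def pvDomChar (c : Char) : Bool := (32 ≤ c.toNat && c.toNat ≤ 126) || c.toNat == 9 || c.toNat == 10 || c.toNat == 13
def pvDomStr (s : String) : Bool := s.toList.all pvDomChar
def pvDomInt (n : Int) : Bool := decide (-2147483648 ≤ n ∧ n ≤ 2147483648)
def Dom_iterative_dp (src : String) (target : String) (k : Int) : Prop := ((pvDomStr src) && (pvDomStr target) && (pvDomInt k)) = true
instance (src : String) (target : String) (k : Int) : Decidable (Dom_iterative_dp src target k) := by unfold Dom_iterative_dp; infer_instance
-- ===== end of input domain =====

-- B replaces A's O(k·n²) DP over rotation states by the closed form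
-- count(target among rotations) · n^(k-1) mod 1e9+7 (k = 0 handled directly).

-- ===== PORT A =====
def pvMOD : Int := 1000000007

-- x = l.pop(0); l.append(x)  (pop(0) runs only on nonempty l; [] case is unreachable there)
def pvRot1 (l : List Char) : List Char :=
  match l with
  | [] => []
  | x :: rest => rest ++ [x]

-- the preprocessing loop: count each rotation of `l`, rotating in place (pop(0)/append)
def pvBuildS : Nat → List Char → PySem.Dict String Int → PySem.Dict String Int
  | 0, _, s => s
  | Nat.succ i, l, s =>
      let w := String.ofList l                                  -- w = ''.join(l)
      let s1 := if s.contains w then s else s.insert w 0        -- if w not in s: s[w] = 0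
      let s2 := s1.insert w (s1.getD w 0 + 1)                   -- s[w] += 1 (key present here)
      pvBuildS i (pvRot1 l) s2

-- one `step` of the DP: the two inner loops over state_to_index.items() and s.items()
def pvStep (sItems : List (String × Int)) (sti : PySem.Dict String Int)
    (dp : List (List Int)) (step : Int) : List (List Int) :=
  sti.items.foldl (fun dp curr =>
    sItems.foldl (fun dp nxt =>
      let nextIdx := sti.getD nxt.1 (-1)                        -- state_to_index[next_state] (always present)
      -- dp[step][next_idx] += dp[step-1][curr_idx] * count; dp[step][next_idx] %= MOD
      let v := PySem.Int.mod
        (PySem.List.pyGetD (PySem.List.pyGetD dp step []) nextIdx 0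
          + PySem.List.pyGetD (PySem.List.pyGetD dp (step - 1) []) curr.2 0 * nxt.2) pvMOD
      PySem.List.pySetD dp step
        (PySem.List.pySetD (PySem.List.pyGetD dp step []) nextIdx v)) dp) dp

def iterative_dp (src : String) (target : String) (k : Int) : Int :=
  let n := src.toList.length
  if target.toList.length ≠ n then 0
  else
    let s := pvBuildS n src.toList PySem.Dict.empty
    if k < 0 then 0   -- Python raises IndexError here (dp[0][0] = 1 on the empty dp); outside Pre_
    else
      -- dp = [[0]*(len(s)+1) for _ in range(k+1)]; dp[0][0] = 1
      let dp0 : List (List Int) := List.replicate (k + 1).toNat (List.replicate (s.size + 1) (0 : Int))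
      let dp1 := PySem.List.pySetD dp0 0 (PySem.List.pySetD (PySem.List.pyGetD dp0 0 []) 0 1)
      -- state_to_index = {state: idx for idx, state in enumerate(s.keys())}
      let sti := (PySem.List.enumerate s.keys 0).foldl (fun d p => d.insert p.2 p.1) PySem.Dict.empty
      let dp := (PySem.List.pyRange 1 (k + 1) 1).foldl (pvStep s.items sti) dp1
      let tIdx := sti.getD target (-1)                           -- state_to_index.get(target, -1)
      if tIdx = -1 then 0
      else PySem.List.pyGetD (PySem.List.pyGetD dp k []) tIdx 0  -- dp[k][target_idx]

-- ===== PORT B =====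
def iterative_dp_alt (src : String) (target : String) (k : Int) : Int :=
  let n := src.toList.length
  if target.toList.length ≠ n then 0
  else if k = 0 then (if target = src then 1 else 0)
  else
    -- cnt = number of i in range(n) with src[i:] + src[:i] == target
    let cnt := (PySem.List.pyRange 0 n 1).foldl
      (fun acc i =>
        if PySem.List.slice src.toList (some i) none ++ PySem.List.slice src.toList none (some i)
             = target.toList
        then acc + 1 else acc) (0 : Int)
    -- cnt * pow(n, k - 1, MOD) % MOD
    PySem.Int.mod (cnt * PySem.Int.mod ((n : Int) ^ (k - 1).toNat) pvMOD) pvMOD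

-- ===== PRECONDITION & SPEC =====
-- Pre_ excludes only inputs where A raises: equal-length src/target with k < 0
-- (there dp = [] and `dp[0][0] = 1` raises IndexError).
def Pre_iterative_dp (src : String) (target : String) (k : Int) : Prop :=
  src.toList.length ≠ target.toList.length ∨ 0 ≤ k
instance (src : String) (target : String) (k : Int) : Decidable (Pre_iterative_dp src target k) := by
  unfold Pre_iterative_dp; infer_instance

def pvWitness_iterative_dp : String × String × Int := ("ab", "ba", 3)

-- On src = "", target = "", k = 0 A returns 0 (its empty rotation dict never contains the
-- start state) while B returns 1, the intended count of the empty path from src to target = src.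
def D_iterative_dp (src : String) (target : String) (k : Int) : Prop :=
  src = "" ∧ target = "" ∧ k = 0
instance (src : String) (target : String) (k : Int) : Decidable (D_iterative_dp src target k) := by
  unfold D_iterative_dp; infer_instance

def Spec_iterative_dp (src : String) (target : String) (k : Int) (out : Int) : Prop :=
  ¬ D_iterative_dp src target k → out = iterative_dp_alt src target k
instance (src : String) (target : String) (k : Int) (out : Int) : Decidable (Spec_iterative_dp src target k out) := by
  unfold Spec_iterative_dp; infer_instance

def pvDiffWitness_iterative_dp : String × String × Int := ("", "", 0)
def pvDiffWitnessOut_iterative_dp : Int × Int := (0, 1)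

-- ===== CLAIM (what is proved, stated in full; the proofs are below) =====
def Claim_unchanged_iterative_dp : Prop := ∀ (src : String) (target : String) (k : Int), Dom_iterative_dp src target k → Pre_iterative_dp src target k → Spec_iterative_dp src target k (iterative_dp src target k)
def Claim_changed_iterative_dp : Prop := Dom_iterative_dp (pvDiffWitness_iterative_dp.1) (pvDiffWitness_iterative_dp.2.1) (pvDiffWitness_iterative_dp.2.2) ∧ Pre_iterative_dp (pvDiffWitness_iterative_dp.1) (pvDiffWitness_iterative_dp.2.1) (pvDiffWitness_iterative_dp.2.2) ∧ D_iterative_dp (pvDiffWitness_iterative_dp.1) (pvDiffWitness_iterative_dp.2.1) (pvDiffWitness_iterative_dp.2.2) ∧ iterative_dp (pvDiffWitness_iterative_dp.1) (pvDiffWitness_iterative_dp.2.1) (pvDiffWitness_iterative_dp.2.2) = pvDiffWitnessOut_iterative_dp.1 ∧ iterative_dp_alt (pvDiffWitness_iterative_dp.1) (pvDiffWitness_iterative_dp.2.1) (pvDiffWitness_iterative_dp.2.2) = pvDiffWitnessOut_iterative_dp.2 ∧ pvDiffWitnessOut_iterative_dp.1 ≠ pvDiffWitnessOut_iterative_dp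.2
def Claim_exact_iterative_dp : Prop := ∀ (src : String) (target : String) (k : Int), Dom_iterative_dp src target k → Pre_iterative_dp src target k → D_iterative_dp src target k → iterative_dp src target k ≠ iterative_dp_alt src target k

-- ===== LEMMAS AND PROOFS =====


-- proof-side objects ------------------------------------------------------

-- the successive rotations A's preprocessing loop visits
def pvRots : Nat → List Char → List String
  | 0, _ => []
  | i + 1, l => String.ofList l :: pvRots i (pvRot1 l)

def pvKeys (R : List String) : List String := PySem.Set.ofList R
def pvItems (R : List String) : List (String × Int) :=
  (pvKeys R).map (fun w => (w, (R.count w : Int)))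
def pvM (R : List String) : Nat := (pvKeys R).length
def pvC (R : List String) (q : Nat) : Int := ((pvItems R).getD q ("", 0)).2

def pvRowOf (R : List String) (S : Int) : List Int :=
  (List.range (pvM R + 1)).map
    (fun q => if q < pvM R then PySem.Int.mod (S * pvC R q) pvMOD else 0)

def pvT (R : List String) : Nat → Int
  | 0 => 1
  | t + 1 => ((List.range (pvM R)).map
      (fun q => PySem.Int.mod (pvT R t * pvC R q) pvMOD)).sum

def pvRow0 (R : List String) : List Int :=
  (List.replicate (pvM R + 1) (0 : Int)).set 0 1

def pvMAT (R : List String) (kn t : Nat) : List (List Int) :=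
  (List.range (kn + 1)).map
    (fun r => if r = 0 then pvRow0 R
      else if r ≤ t then pvRowOf R (pvT R (r - 1))
      else List.replicate (pvM R + 1) (0 : Int))

-- basic list helpers -------------------------------------------------------

theorem pv_getD_map_range {α : Type} (f : Nat → α) (n q : Nat) (d : α) :
    (((List.range n).map f).getD q d) = if q < n then f q else d := by
  rcases Nat.lt_or_ge q n with h | h
  · simp [List.getD_eq_getElem?_getD, h]
  · rw [List.getD_eq_getElem?_getD, List.getElem?_eq_none (by simpa using h)]
    simp [Nat.not_lt.mpr h]

theorem pv_getD_set (l : List Int) (i q : Nat) (v : Int) (h : i < l.length) :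
    ((l.set i v).getD q 0) = if q = i then v else l.getD q 0 := by
  rcases eq_or_ne q i with rfl | hne
  · simp [List.getD_eq_getElem?_getD, h]
  · simp [List.getD_eq_getElem?_getD, List.getElem?_set_ne (fun hh => hne hh.symm), hne]

theorem pv_mod_eq (a : Int) : PySem.Int.mod a pvMOD = a % pvMOD := by
  simp [PySem.Int.mod, pvMOD, Int.fmod_eq_emod]

-- rotations ----------------------------------------------------------------

theorem pvRot1_eq_rotate (l : List Char) : pvRot1 l = l.rotate 1 := by
  cases l with
  | nil => simp [pvRot1]
  | cons x xs => simp [pvRot1, List.rotate_cons_succ]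

theorem pvRots_eq (i : Nat) (l : List Char) :
    pvRots i l = (List.range i).map (fun j => String.ofList (l.rotate j)) := by
  induction i generalizing l with
  | zero => simp [pvRots]
  | succ i ih =>
      rw [pvRots, ih, List.range_succ_eq_map]
      simp [pvRot1_eq_rotate, List.rotate_rotate, List.map_map, Function.comp_def,
        Nat.succ_eq_add_one, Nat.add_comm]

-- the preprocessing loop builds the rotation counter -----------------------

theorem pvBuildS_eq (i : Nat) (l : List Char) (d : PySem.Dict String Int) :
    pvBuildS i l d = (pvRots i l).foldl (fun d w => d.insert w (d.getD w 0 + 1)) d := by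
  induction i generalizing l d with
  | zero => simp [pvRots, pvBuildS]
  | succ i ih =>
      rw [pvBuildS, pvRots, List.foldl_cons, ih]
      congr 1
      by_cases h : d.contains (String.ofList l)
      · simp [h]
      · simp [h, PySem.Dict.getD_insert_self, PySem.Dict.insert_insert_self,
          PySem.Dict.getD_of_not_contains _ _ (by simpa using h)]

theorem pvBuildS_counter (i : Nat) (l : List Char) :
    pvBuildS i l PySem.Dict.empty = PySem.Dict.counter (pvRots i l) := by
  rw [pvBuildS_eq, PySem.Dict.foldl_insert_getD_add_one_eq_counter]

-- the s dict of A, described --------------------------------------------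

theorem pv_s_items (R : List String) :
    (PySem.Dict.counter R).items = pvItems R := by
  rw [PySem.Dict.items_counter]; rfl

theorem pv_s_keys (R : List String) :
    (PySem.Dict.counter R).keys = pvKeys R := by
  rw [PySem.Dict.keys_counter]; rfl

theorem pv_s_size (R : List String) :
    (PySem.Dict.counter R).size = pvM R := by
  have h := pv_s_keys R
  simp only [PySem.Dict.size, PySem.Dict.keys] at *
  calc (PySem.Dict.counter R).items.length
      = ((PySem.Dict.counter R).items.map (·.1)).length := by simp
    _ = pvM R := by rw [h]; rfl

-- the state_to_index dict of A, described ----------------------------------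

def pvSTI (R : List String) : PySem.Dict String Int :=
  (PySem.List.enumerate (PySem.Dict.counter R).keys 0).foldl
    (fun d p => d.insert p.2 p.1) PySem.Dict.empty

theorem pvSTI_items (R : List String) :
    (pvSTI R).items = (PySem.List.enumerate (pvKeys R) 0).map (fun p => (p.2, p.1)) := by
  unfold pvSTI
  rw [PySem.Dict.items_foldl_insert_fresh _ _ _ _ (by simp) ?nd]
  case nd =>
    rw [PySem.List.map_snd_enumerate, pv_s_keys]
    exact PySem.Set.nodup_ofList R
  rw [pv_s_keys]; rfl

theorem pvSTI_keys (R : List String) : (pvSTI R).keys = pvKeys R := by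
  simp only [PySem.Dict.keys, pvSTI_items, List.map_map]
  exact PySem.List.map_snd_enumerate _ _

theorem pvSTI_keys_nodup (R : List String) : (pvSTI R).keys.Nodup := by
  rw [pvSTI_keys]; exact PySem.Set.nodup_ofList R

theorem pvSTI_getD_pos (R : List String) (j : Nat) (h : j < pvM R) :
    (pvSTI R).getD ((pvKeys R).getD j "") (-1) = (j : Int) := by
  have hkeys : ((pvKeys R).getD j "", (j : Int)) ∈ (pvSTI R).items := by
    rw [pvSTI_items]
    refine List.mem_map.mpr ⟨((j : Int), (pvKeys R).getD j ""), ?_, rfl⟩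
    rw [PySem.List.mem_enumerate_iff]
    exact ⟨j, h, by simp [List.getD_eq_getElem?_getD, List.getElem?_eq_getElem h]⟩
  exact PySem.Dict.getD_of_mem_items _ hkeys (pvSTI_keys_nodup R) _

theorem pvSTI_getD_absent (R : List String) (w : String) (h : w ∉ pvKeys R) :
    (pvSTI R).getD w (-1) = -1 := by
  rw [PySem.Dict.getD_eq_get?_getD,
    (PySem.Dict.get?_eq_none_iff_not_mem_keys _ _).mpr (by rw [pvSTI_keys]; exact h)]
  rfl


theorem pv_items_length (R : List String) : (pvItems R).length = pvM R := by
  simp [pvItems, pvM]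

theorem pv_map_getD_self (l : List Int) :
    (List.range l.length).map (fun q => l.getD q 0) = l := by
  apply List.ext_getElem (by simp)
  intro q h1 h2
  simp [List.getD_eq_getElem?_getD, List.getElem?_eq_getElem h2]

theorem pv_items_fst (R : List String) (a : Nat) (h : a < pvM R) :
    ((pvItems R).getD a ("", 0)).1 = (pvKeys R).getD a "" := by
  have ha : a < (pvKeys R).length := h
  simp [pvItems, List.getD_eq_getElem?_getD, List.getElem?_map,
    List.getElem?_eq_getElem ha]

theorem pv_items_snd (R : List String) (a : Nat) (h : a < pvM R) :
    pvC R a = (R.count ((pvKeys R).getD a "") : Int) := by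
  have ha : a < (pvKeys R).length := h
  simp [pvC, pvItems, List.getD_eq_getElem?_getD, List.getElem?_map,
    List.getElem?_eq_getElem ha]

-- DP: one inner loop (fixed curr, p = dp[step-1][curr_idx]) on the row -----

theorem pv_inner_row (R : List String) (p : Int) :
    ∀ (fuel a : Nat) (row : List Int), a + fuel = pvM R → row.length = pvM R + 1 →
    ((pvItems R).drop a).foldl
      (fun row nxt => PySem.List.pySetD row ((pvSTI R).getD nxt.1 (-1))
        (PySem.Int.mod
          (PySem.List.pyGetD row ((pvSTI R).getD nxt.1 (-1)) 0 + p * nxt.2) pvMOD)) row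
    = (List.range (pvM R + 1)).map
        (fun q => if a ≤ q ∧ q < pvM R
          then PySem.Int.mod (row.getD q 0 + p * pvC R q) pvMOD
          else row.getD q 0) := by
  intro fuel
  induction fuel with
  | zero =>
      intro a row ha hrow
      have hdrop : (pvItems R).drop a = [] :=
        List.drop_eq_nil_of_le (by rw [pv_items_length]; omega)
      rw [hdrop, List.foldl_nil]
      have : ∀ q, ¬ (a ≤ q ∧ q < pvM R) := by omega
      calc row = (List.range row.length).map (fun q => row.getD q 0) :=
            (pv_map_getD_self row).symm
        _ = _ := by
            rw [hrow]
            exact List.map_congr_left (fun q hq => by simp [this q])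
  | succ fuel ih =>
      intro a row ha hrow
      have ham : a < pvM R := by omega
      have ha' : a < (pvItems R).length := by rw [pv_items_length]; omega
      rw [List.drop_eq_getElem_cons ha', List.foldl_cons]
      have hfst : ((pvItems R)[a]).1 = (pvKeys R).getD a "" := by
        rw [← pv_items_fst R a ham]
        simp [List.getD_eq_getElem?_getD, List.getElem?_eq_getElem ha']
      have hsnd : ((pvItems R)[a]).2 = pvC R a := by
        simp [pvC, List.getD_eq_getElem?_getD, List.getElem?_eq_getElem ha']
      have hsti : (pvSTI R).getD ((pvItems R)[a]).1 (-1) = (a : Int) := by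
        rw [hfst]; exact pvSTI_getD_pos R a ham
      have halen : a < row.length := by omega
      have hbody :
          PySem.List.pySetD row ((pvSTI R).getD ((pvItems R)[a]).1 (-1))
            (PySem.Int.mod (PySem.List.pyGetD row ((pvSTI R).getD ((pvItems R)[a]).1 (-1)) 0
              + p * ((pvItems R)[a]).2) pvMOD)
          = row.set a (PySem.Int.mod (row.getD a 0 + p * pvC R a) pvMOD) := by
        rw [hsti, hsnd]
        simp [PySem.List.pySetD_natCast, PySem.List.pyGetD_natCast]
      rw [hbody]
      rw [ih (a + 1) _ (by omega) (by simp [hrow])]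
      apply List.map_congr_left
      intro q hq
      rw [List.mem_range] at hq
      have hgd : (row.set a (PySem.Int.mod (row.getD a 0 + p * pvC R a) pvMOD)).getD q 0
          = if q = a then PySem.Int.mod (row.getD a 0 + p * pvC R a) pvMOD else row.getD q 0 :=
        pv_getD_set row a q _ halen
      rcases eq_or_ne q a with rfl | hne
      · rw [if_neg (by omega : ¬ (q + 1 ≤ q ∧ q < pvM R)), if_pos ⟨le_refl q, ham⟩, hgd,
          if_pos rfl]
      · rw [hgd, if_neg hne]
        by_cases hq2 : a + 1 ≤ q ∧ q < pvM R
        · rw [if_pos hq2, if_pos (by omega)]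
        · rw [if_neg hq2, if_neg (by omega)]

theorem pv_inner_rowOf (R : List String) (p S : Int) :
    (pvItems R).foldl
      (fun row nxt => PySem.List.pySetD row ((pvSTI R).getD nxt.1 (-1))
        (PySem.Int.mod
          (PySem.List.pyGetD row ((pvSTI R).getD nxt.1 (-1)) 0 + p * nxt.2) pvMOD))
      (pvRowOf R S)
    = pvRowOf R (S + p) := by
  have h0 : pvItems R = (pvItems R).drop 0 := rfl
  rw [h0, pv_inner_row R p (pvM R) 0 (pvRowOf R S) (by omega) (by simp [pvRowOf])]
  apply List.map_congr_left
  intro q hq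
  rw [List.mem_range] at hq
  have hgd : (pvRowOf R S).getD q 0
      = if q < pvM R then PySem.Int.mod (S * pvC R q) pvMOD else 0 := by
    rw [pvRowOf, pv_getD_map_range]
    simp [hq]
  by_cases hqm : q < pvM R
  · rw [if_pos ⟨Nat.zero_le q, hqm⟩, hgd, if_pos hqm, if_pos hqm]
    rw [pv_mod_eq, pv_mod_eq, pv_mod_eq, add_mul, Int.emod_add_emod]
  · rw [if_neg (by omega), hgd, if_neg hqm, if_neg hqm]

-- DP: the outer loop over state_to_index.items() on the row ----------------

theorem pv_outer_row (R : List String) (prevRow : List Int) (hl : prevRow.length = pvM R + 1) :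
    ∀ (fuel a : Nat) (S : Int), a + fuel = pvM R →
    (PySem.List.enumerate ((pvKeys R).drop a) (a : Int)).foldl
      (fun row pr => (pvItems R).foldl
        (fun row nxt => PySem.List.pySetD row ((pvSTI R).getD nxt.1 (-1))
          (PySem.Int.mod
            (PySem.List.pyGetD row ((pvSTI R).getD nxt.1 (-1)) 0
              + PySem.List.pyGetD prevRow pr.1 0 * nxt.2) pvMOD)) row)
      (pvRowOf R S)
    = pvRowOf R (S + ((prevRow.take (pvM R)).drop a).sum) := by
  intro fuel
  induction fuel with
  | zero =>
      intro a S ha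
      have hdrop : (pvKeys R).drop a = [] := List.drop_eq_nil_of_le (by
        show (pvKeys R).length ≤ a; rw [show (pvKeys R).length = pvM R from rfl]; omega)
      have htake : (prevRow.take (pvM R)).drop a = [] := List.drop_eq_nil_of_le (by
        rw [List.length_take, hl]; omega)
      rw [hdrop, htake]
      simp [PySem.List.enumerate]
  | succ fuel ih =>
      intro a S ha
      have ham : a < pvM R := by omega
      have haK : a < (pvKeys R).length := ham
      rw [List.drop_eq_getElem_cons haK, PySem.List.enumerate_cons, List.foldl_cons,
        pv_inner_rowOf R (PySem.List.pyGetD prevRow (a : Int) 0) S]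
      have hcast : ((a : Int) + 1) = ((a + 1 : Nat) : Int) := by push_cast; ring
      rw [hcast, ih (a + 1) _ (by omega)]
      congr 1
      have htlen : a < (prevRow.take (pvM R)).length := by rw [List.length_take, hl]; omega
      rw [List.drop_eq_getElem_cons htlen, List.sum_cons]
      have hget : (prevRow.take (pvM R))[a] = PySem.List.pyGetD prevRow (a : Int) 0 := by
        rw [List.getElem_take]
        have hplen : a < prevRow.length := by omega
        simp [List.getD_eq_getElem?_getD, List.getElem?_eq_getElem hplen]
      rw [hget]; ring


theorem pv_set_getD_self {α : Type} (dp : List α) (t : Nat) (d : α) (h : t < dp.length) :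
    dp.set t (dp.getD t d) = dp := by
  apply List.ext_getElem (by simp)
  intro q h1 h2
  rcases eq_or_ne q t with rfl | hne
  · simp [List.getD_eq_getElem?_getD, List.getElem?_eq_getElem h]
  · simp [List.getElem_set_ne hne.symm]

theorem pv_pyGetD_pySetD_pred (dp : List (List Int)) (t : Nat) (v : List Int)
    (ht : 1 ≤ t) (h : t < dp.length) :
    PySem.List.pyGetD (PySem.List.pySetD dp (t : Int) v) ((t : Int) - 1) []
      = PySem.List.pyGetD dp ((t : Int) - 1) [] := by
  have hc : ((t : Int) - 1) = ((t - 1 : Nat) : Int) := by push_cast [ht]; ring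
  rw [hc, PySem.List.pyGetD_pySetD_natCast dp t (t - 1) v [] h, if_neg (by omega)]

theorem pv_pyGetD_pySetD_self (dp : List (List Int)) (t : Nat) (v : List Int)
    (h : t < dp.length) :
    PySem.List.pyGetD (PySem.List.pySetD dp (t : Int) v) (t : Int) [] = v := by
  rw [PySem.List.pyGetD_pySetD_natCast dp t t v [] h, if_pos rfl]

-- DP: one full `step` on the matrix ----------------------------------------

theorem pv_inner_mat (R : List String) (ci : Int) :
    ∀ (l : List (String × Int)) (dp : List (List Int)) (t : Nat), 1 ≤ t → t < dp.length →
    l.foldl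
      (fun dp nxt => PySem.List.pySetD dp (t : Int)
        (PySem.List.pySetD (PySem.List.pyGetD dp (t : Int) []) ((pvSTI R).getD nxt.1 (-1))
          (PySem.Int.mod
            (PySem.List.pyGetD (PySem.List.pyGetD dp (t : Int) []) ((pvSTI R).getD nxt.1 (-1)) 0
              + PySem.List.pyGetD (PySem.List.pyGetD dp ((t : Int) - 1) []) ci 0 * nxt.2) pvMOD))) dp
    = PySem.List.pySetD dp (t : Int)
        (l.foldl
          (fun row nxt => PySem.List.pySetD row ((pvSTI R).getD nxt.1 (-1))
            (PySem.Int.mod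
              (PySem.List.pyGetD row ((pvSTI R).getD nxt.1 (-1)) 0
                + PySem.List.pyGetD (PySem.List.pyGetD dp ((t : Int) - 1) []) ci 0 * nxt.2) pvMOD))
          (PySem.List.pyGetD dp (t : Int) [])) := by
  intro l
  induction l with
  | nil =>
      intro dp t ht hlen
      rw [List.foldl_nil, List.foldl_nil]
      simp only [PySem.List.pySetD_natCast, PySem.List.pyGetD_natCast]
      exact (pv_set_getD_self dp t [] hlen).symm
  | cons x xs ih =>
      intro dp t ht hlen
      rw [List.foldl_cons, List.foldl_cons]
      set r1 := PySem.List.pySetD (PySem.List.pyGetD dp (t : Int) []) ((pvSTI R).getD x.1 (-1))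
        (PySem.Int.mod
          (PySem.List.pyGetD (PySem.List.pyGetD dp (t : Int) []) ((pvSTI R).getD x.1 (-1)) 0
            + PySem.List.pyGetD (PySem.List.pyGetD dp ((t : Int) - 1) []) ci 0 * x.2) pvMOD) with hr1
      set dp1 := PySem.List.pySetD dp (t : Int) r1 with hdp1
      have hlen1 : t < dp1.length := by
        rw [hdp1]; simp only [PySem.List.pySetD_natCast, List.length_set]; exact hlen
      rw [ih dp1 t ht hlen1]
      have e1 : PySem.List.pyGetD dp1 ((t : Int) - 1) [] = PySem.List.pyGetD dp ((t : Int) - 1) [] :=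
        pv_pyGetD_pySetD_pred dp t r1 ht hlen
      have e2 : PySem.List.pyGetD dp1 (t : Int) [] = r1 :=
        pv_pyGetD_pySetD_self dp t r1 hlen
      have e3 : ∀ z, PySem.List.pySetD dp1 (t : Int) z = PySem.List.pySetD dp (t : Int) z := by
        intro z
        rw [hdp1]
        simp only [PySem.List.pySetD_natCast]
        exact List.set_set r1
      rw [e1, e2, e3]

theorem pv_step_mat (R : List String) :
    ∀ (dp : List (List Int)) (t : Nat), 1 ≤ t → t < dp.length →
    pvStep (pvItems R) (pvSTI R) dp (t : Int)
    = PySem.List.pySetD dp (t : Int)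
        ((pvSTI R).items.foldl
          (fun row curr => (pvItems R).foldl
            (fun row nxt => PySem.List.pySetD row ((pvSTI R).getD nxt.1 (-1))
              (PySem.Int.mod
                (PySem.List.pyGetD row ((pvSTI R).getD nxt.1 (-1)) 0
                  + PySem.List.pyGetD (PySem.List.pyGetD dp ((t : Int) - 1) []) curr.2 0 * nxt.2) pvMOD)) row)
          (PySem.List.pyGetD dp (t : Int) [])) := by
  have main : ∀ (L : List (String × Int)) (dp : List (List Int)) (t : Nat),
      1 ≤ t → t < dp.length →
      L.foldl (fun dp curr => (pvItems R).foldl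
        (fun dp nxt => PySem.List.pySetD dp (t : Int)
          (PySem.List.pySetD (PySem.List.pyGetD dp (t : Int) []) ((pvSTI R).getD nxt.1 (-1))
            (PySem.Int.mod
              (PySem.List.pyGetD (PySem.List.pyGetD dp (t : Int) []) ((pvSTI R).getD nxt.1 (-1)) 0
                + PySem.List.pyGetD (PySem.List.pyGetD dp ((t : Int) - 1) []) curr.2 0 * nxt.2) pvMOD))) dp) dp
      = PySem.List.pySetD dp (t : Int)
          (L.foldl
            (fun row curr => (pvItems R).foldl
              (fun row nxt => PySem.List.pySetD row ((pvSTI R).getD nxt.1 (-1))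
                (PySem.Int.mod
                  (PySem.List.pyGetD row ((pvSTI R).getD nxt.1 (-1)) 0
                    + PySem.List.pyGetD (PySem.List.pyGetD dp ((t : Int) - 1) []) curr.2 0 * nxt.2) pvMOD)) row)
            (PySem.List.pyGetD dp (t : Int) [])) := by
    intro L
    induction L with
    | nil =>
        intro dp t ht hlen
        rw [List.foldl_nil, List.foldl_nil]
        simp only [PySem.List.pySetD_natCast, PySem.List.pyGetD_natCast]
        exact (pv_set_getD_self dp t [] hlen).symm
    | cons x xs ih =>
        intro dp t ht hlen
        rw [List.foldl_cons, List.foldl_cons, pv_inner_mat R x.2 (pvItems R) dp t ht hlen]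
        set r1 := (pvItems R).foldl
          (fun row nxt => PySem.List.pySetD row ((pvSTI R).getD nxt.1 (-1))
            (PySem.Int.mod
              (PySem.List.pyGetD row ((pvSTI R).getD nxt.1 (-1)) 0
                + PySem.List.pyGetD (PySem.List.pyGetD dp ((t : Int) - 1) []) x.2 0 * nxt.2) pvMOD))
          (PySem.List.pyGetD dp (t : Int) []) with hr1
        set dp1 := PySem.List.pySetD dp (t : Int) r1 with hdp1
        have hlen1 : t < dp1.length := by
          rw [hdp1]; simp only [PySem.List.pySetD_natCast, List.length_set]; exact hlen
        rw [ih dp1 t ht hlen1]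
        have e1 : PySem.List.pyGetD dp1 ((t : Int) - 1) [] = PySem.List.pyGetD dp ((t : Int) - 1) [] :=
          pv_pyGetD_pySetD_pred dp t r1 ht hlen
        have e2 : PySem.List.pyGetD dp1 (t : Int) [] = r1 :=
          pv_pyGetD_pySetD_self dp t r1 hlen
        have e3 : ∀ z, PySem.List.pySetD dp1 (t : Int) z = PySem.List.pySetD dp (t : Int) z := by
          intro z
          rw [hdp1]
          simp only [PySem.List.pySetD_natCast]
          exact List.set_set r1
        rw [e1, e2, e3]
  intro dp t ht hlen
  simp only [pvStep]
  exact main (pvSTI R).items dp t ht hlen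


theorem pv_rowOf_length (R : List String) (S : Int) : (pvRowOf R S).length = pvM R + 1 := by
  simp [pvRowOf]

theorem pv_zrow_eq (R : List String) : List.replicate (pvM R + 1) (0 : Int) = pvRowOf R 0 := by
  symm
  rw [List.eq_replicate_iff]
  refine ⟨by simp [pvRowOf], ?_⟩
  intro b hb
  rw [pvRowOf] at hb
  obtain ⟨q, hq, rfl⟩ := List.mem_map.mp hb
  split
  · rw [pv_mod_eq]; simp
  · rfl

theorem pv_mat_length (R : List String) (kn t : Nat) : (pvMAT R kn t).length = kn + 1 := by
  simp [pvMAT]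

theorem pv_mat_getD (R : List String) (kn t r : Nat) (h : r < kn + 1) :
    PySem.List.pyGetD (pvMAT R kn t) (r : Int) []
      = (if r = 0 then pvRow0 R
         else if r ≤ t then pvRowOf R (pvT R (r - 1))
         else List.replicate (pvM R + 1) (0 : Int)) := by
  rw [pvMAT]
  simp only [PySem.List.pyGetD_natCast]
  rw [pv_getD_map_range _ _ _ [], if_pos h]

theorem pv_mat_set (R : List String) (kn t : Nat) (_h : t + 1 ≤ kn) :
    PySem.List.pySetD (pvMAT R kn t) ((t + 1 : Nat) : Int) (pvRowOf R (pvT R t))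
      = pvMAT R kn (t + 1) := by
  simp only [PySem.List.pySetD_natCast]
  apply List.ext_getElem (by simp [pvMAT])
  intro q h1 h2
  have hq : q < kn + 1 := by simpa [pvMAT] using h2
  rcases eq_or_ne q (t + 1) with rfl | hne
  · rw [List.getElem_set_self (by simpa [pvMAT] using h2)]
    simp [pvMAT, List.getElem_map, List.getElem_range]
  · rw [List.getElem_set_ne hne.symm]
    simp only [pvMAT, List.getElem_map, List.getElem_range]
    rcases eq_or_ne q 0 with rfl | h0
    · simp
    · rw [if_neg h0, if_neg h0]
      by_cases hle : q ≤ t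
      · rw [if_pos hle, if_pos (by omega)]
      · rw [if_neg hle, if_neg (by omega)]

theorem pv_prev_len (R : List String) (kn t : Nat) (_ht : t ≤ kn) :
    (PySem.List.pyGetD (pvMAT R kn t) (t : Int) []).length = pvM R + 1 := by
  rw [pv_mat_getD R kn t t (by omega)]
  split
  · simp [pvRow0]
  · split
    · exact pv_rowOf_length R _
    · simp

theorem pv_prev_sum (R : List String) (hm : 1 ≤ pvM R) (kn t : Nat) (ht : t ≤ kn) :
    ((PySem.List.pyGetD (pvMAT R kn t) (t : Int) []).take (pvM R)).sum = pvT R t := by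
  rw [pv_mat_getD R kn t t (by omega)]
  cases t with
  | zero =>
      rw [if_pos rfl]
      obtain ⟨mm, hmm⟩ : ∃ mm, pvM R = mm + 1 := ⟨pvM R - 1, by omega⟩
      rw [pvRow0, hmm]
      rw [show mm + 1 + 1 = mm + 2 from rfl, List.replicate_succ, List.set_cons_zero,
        List.take_succ_cons, List.take_replicate, List.sum_cons, List.sum_replicate]
      simp [pvT]
  | succ s =>
      rw [if_neg (by omega), if_pos (le_refl _)]
      rw [pvRowOf, ← List.map_take, List.take_range, show min (pvM R) (pvM R + 1) = pvM R from by omega]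
      have : (List.range (pvM R)).map
          (fun q => if q < pvM R then PySem.Int.mod (pvT R (s + 1 - 1) * pvC R q) pvMOD else 0)
          = (List.range (pvM R)).map (fun q => PySem.Int.mod (pvT R (s + 1 - 1) * pvC R q) pvMOD) := by
        apply List.map_congr_left
        intro q hq
        rw [List.mem_range] at hq
        simp [hq]
      rw [this]
      rfl

theorem pv_outer_row_all (R : List String) (prevRow : List Int)
    (hl : prevRow.length = pvM R + 1) (S : Int) :
    (PySem.List.enumerate (pvKeys R) 0).foldl
      (fun row pr => (pvItems R).foldl
        (fun row nxt => PySem.List.pySetD row ((pvSTI R).getD nxt.1 (-1))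
          (PySem.Int.mod
            (PySem.List.pyGetD row ((pvSTI R).getD nxt.1 (-1)) 0
              + PySem.List.pyGetD prevRow pr.1 0 * nxt.2) pvMOD)) row)
      (pvRowOf R S)
    = pvRowOf R (S + (prevRow.take (pvM R)).sum) := by
  have h := pv_outer_row R prevRow hl (pvM R) 0 S (by omega)
  simp only [List.drop_zero, Nat.cast_zero] at h
  exact h

-- the whole DP fold --------------------------------------------------------

theorem pv_dp_fold (R : List String) (hm : 1 ≤ pvM R) (kn : Nat) :
    ∀ t : Nat, t ≤ kn →
    (PySem.List.pyRange 1 ((t : Int) + 1) 1).foldl (pvStep (pvItems R) (pvSTI R)) (pvMAT R kn 0)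
    = pvMAT R kn t := by
  intro t
  induction t with
  | zero =>
      intro _
      rw [show (((0 : Nat) : Int) + 1) = 1 by simp, PySem.List.pyRange_one_eq_nil (by norm_num),
        List.foldl_nil]
  | succ t ih =>
      intro ht
      have h1 : (((t + 1 : Nat) : Int) + 1) = (((t : Int) + 1) + 1) := by push_cast; ring
      rw [h1, PySem.List.pyRange_one_succ_right (a := 1) (b := (t : Int) + 1) (by omega),
        List.foldl_append, ih (by omega), List.foldl_cons, List.foldl_nil]
      have hcast : ((t : Int) + 1) = ((t + 1 : Nat) : Int) := by push_cast; ring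
      rw [hcast, pv_step_mat R (pvMAT R kn t) (t + 1) (by omega)
        (by rw [pv_mat_length]; omega)]
      have hprev : PySem.List.pyGetD (pvMAT R kn t) (((t + 1 : Nat) : Int) - 1) []
          = PySem.List.pyGetD (pvMAT R kn t) ((t : Nat) : Int) [] := by
        congr 1
        push_cast
        ring
      rw [hprev]
      have hstart : PySem.List.pyGetD (pvMAT R kn t) ((t + 1 : Nat) : Int) [] = pvRowOf R 0 := by
        rw [pv_mat_getD R kn t (t + 1) (by omega), if_neg (by omega), if_neg (by omega),
          pv_zrow_eq]
      rw [hstart, pvSTI_items, List.foldl_map]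
      have hbody :
          (fun (row : List Int) (x : Int × String) => (pvItems R).foldl
            (fun row nxt => PySem.List.pySetD row ((pvSTI R).getD nxt.1 (-1))
              (PySem.Int.mod
                (PySem.List.pyGetD row ((pvSTI R).getD nxt.1 (-1)) 0
                  + PySem.List.pyGetD (PySem.List.pyGetD (pvMAT R kn t) ((t : Nat) : Int) [])
                      ((x.2, x.1) : String × Int).2 0 * nxt.2) pvMOD)) row)
          = (fun (row : List Int) (pr : Int × String) => (pvItems R).foldl
            (fun row nxt => PySem.List.pySetD row ((pvSTI R).getD nxt.1 (-1))
              (PySem.Int.mod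
                (PySem.List.pyGetD row ((pvSTI R).getD nxt.1 (-1)) 0
                  + PySem.List.pyGetD (PySem.List.pyGetD (pvMAT R kn t) ((t : Nat) : Int) [])
                      pr.1 0 * nxt.2) pvMOD)) row) := rfl
      rw [hbody, pv_outer_row_all R _ (pv_prev_len R kn t (by omega)) 0,
        pv_prev_sum R hm kn t (by omega), zero_add, pv_mat_set R kn t (by omega)]

theorem pv_dp1_eq_mat0 (R : List String) (kn : Nat) :
    PySem.List.pySetD (List.replicate (kn + 1) (List.replicate (pvM R + 1) (0 : Int))) 0
      (PySem.List.pySetD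
        (PySem.List.pyGetD (List.replicate (kn + 1) (List.replicate (pvM R + 1) (0 : Int))) 0 []) 0 1)
    = pvMAT R kn 0 := by
  have hz : (0 : Int) = ((0 : Nat) : Int) := rfl
  rw [hz]
  simp only [PySem.List.pySetD_natCast, PySem.List.pyGetD_natCast]
  apply List.ext_getElem (by simp [pvMAT])
  intro q h1 h2
  have hq : q < kn + 1 := by simpa using h1
  rcases eq_or_ne q 0 with rfl | h0
  · rw [List.getElem_set_self (by simp)]
    simp [pvMAT, pvRow0, List.getD_eq_getElem?_getD]
  · rw [List.getElem_set_ne h0.symm]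
    simp [pvMAT, h0, List.getElem_replicate]


theorem pv_sum_mod : ∀ (l : List Int),
    ((l.map (fun x => x % pvMOD)).sum) % pvMOD = l.sum % pvMOD := by
  intro l
  induction l with
  | nil => rfl
  | cons x xs ih =>
      rw [List.map_cons, List.sum_cons, List.sum_cons]
      unfold pvMOD at *
      omega

theorem pv_foldl_count (P : Nat → Prop) [DecidablePred P] :
    ∀ (l : List Nat) (acc : Int),
    l.foldl (fun acc j => if P j then acc + 1 else acc) acc
      = acc + (l.countP (fun j => decide (P j)) : Int) := by
  intro l
  induction l with
  | nil => intro acc; simp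
  | cons x xs ih =>
      intro acc
      rw [List.foldl_cons, List.countP_cons]
      by_cases h : P x
      · rw [if_pos h, ih]; simp [h]; ring
      · rw [if_neg h, ih]; simp [h]

-- counting and congruence --------------------------------------------------

theorem pv_sum_counts (R : List String) :
    ((List.range (pvM R)).map (fun q => pvC R q)).sum = (R.length : Int) := by
  have h1 : (List.range (pvM R)).map (fun q => pvC R q) = (pvItems R).map (·.2) := by
    apply List.ext_getElem (by simp [pv_items_length])
    intro q h1 h2
    have hq : q < (pvItems R).length := by simpa using h2
    simp only [List.getElem_map, List.getElem_range]
    simp [pvC, List.getD_eq_getElem?_getD, List.getElem?_eq_getElem hq]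
  rw [h1]
  have h2 : (pvItems R).map (·.2) = (pvKeys R).map (fun w => (R.count w : Int)) := by
    simp [pvItems, List.map_map]
  rw [h2]
  have h3 : ((pvKeys R).map (fun w => (R.count w : Int))).sum
      = (((pvKeys R).map (fun w => R.count w)).sum : Int) := by
    rw [Nat.cast_list_sum, List.map_map]
    rfl
  rw [h3]
  have hperm : (pvKeys R).Perm R.dedup :=
    List.perm_of_nodup_nodup_toFinset_eq (PySem.Set.nodup_ofList R) (List.nodup_dedup R)
      (by ext x; simp [List.mem_toFinset, List.mem_dedup, ← PySem.List.dedup_eq_ofList,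
        PySem.List.mem_dedup, pvKeys])
  have h4 : ((pvKeys R).map (fun w => R.count w)).sum = R.length := by
    rw [(hperm.map (fun w => R.count w)).sum_eq]
    exact List.sum_map_count_dedup_eq_length R
  rw [h4]

theorem pv_T_modeq (R : List String) (_hm : 1 ≤ pvM R) (t : Nat) :
    pvT R t % pvMOD = ((R.length : Int) ^ t) % pvMOD := by
  induction t with
  | zero => rfl
  | succ t ih =>
      rw [pvT]
      have h1 : (List.range (pvM R)).map (fun q => PySem.Int.mod (pvT R t * pvC R q) pvMOD)
          = ((List.range (pvM R)).map (fun q => pvT R t * pvC R q)).map (fun x => x % pvMOD) := by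
        simp [List.map_map, Function.comp_def, pv_mod_eq]
      rw [h1, pv_sum_mod, List.sum_map_mul_left, pv_sum_counts]
      rw [Int.mul_emod, ih, ← Int.mul_emod, ← pow_succ]

-- B's counting loop --------------------------------------------------------

theorem pv_cnt_eq (src target : String) :
    ((PySem.List.pyRange 0 (src.toList.length : Int) 1).foldl
      (fun acc i =>
        if PySem.List.slice src.toList (some i) none ++ PySem.List.slice src.toList none (some i)
             = target.toList
        then acc + 1 else acc) (0 : Int))
    = ((pvRots src.toList.length src.toList).count target : Int) := by
  rw [PySem.List.pyRange_zero_nat, List.foldl_map,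
    pv_foldl_count (fun j : Nat =>
      PySem.List.slice src.toList (some (j : Int)) none
        ++ PySem.List.slice src.toList none (some (j : Int)) = target.toList)
      (List.range src.toList.length) 0, zero_add]
  rw [pvRots_eq, List.count_eq_countP, List.countP_map]
  congr 1
  apply List.countP_congr
  intro j hj
  rw [List.mem_range] at hj
  simp only [PySem.List.slice_from_natCast, PySem.List.slice_to_natCast,
    Function.comp_def, decide_eq_true_eq, beq_iff_eq]
  rw [List.rotate_eq_drop_append_take (by omega)]
  constructor
  · intro h; rw [h, String.ofList_toList]
  · intro h; rw [← h, String.toList_ofList]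

-- assembly pieces ----------------------------------------------------------

theorem pv_keys_head (l : List Char) (n : Nat) (hn : 1 ≤ n) :
    (pvKeys (pvRots n l)).getD 0 "" = String.ofList l := by
  have hpre : ∀ (xs s : List String), s <+: xs.foldl PySem.Set.add s := by
    intro xs
    induction xs with
    | nil => intro s; exact List.prefix_refl s
    | cons y ys ih =>
        intro s
        rw [List.foldl_cons]
        refine List.IsPrefix.trans ?_ (ih (PySem.Set.add s y))
        unfold PySem.Set.add
        split
        · exact List.prefix_refl s
        · exact List.prefix_append s [y]
  obtain ⟨nn, rfl⟩ : ∃ nn, n = nn + 1 := ⟨n - 1, by omega⟩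
  rw [pvKeys, pvRots, PySem.Set.ofList_eq_foldl, List.foldl_cons]
  have hadd : PySem.Set.add ([] : List String) (String.ofList l) = [String.ofList l] := by
    simp [PySem.Set.add, PySem.Set.contains]
  rw [hadd]
  obtain ⟨t, ht⟩ := hpre (pvRots nn (pvRot1 l)) [String.ofList l]
  rw [← ht]
  rfl

-- ===== VERDICT (by name: the statement is the Claim_ definition above) =====
theorem iterative_dp_spec : Claim_unchanged_iterative_dp := by
  unfold Claim_unchanged_iterative_dp
  intro src target k _hdom hpre
  unfold Spec_iterative_dp
  intro hnd
  by_cases hlen : target.toList.length ≠ src.toList.length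
  · simp only [iterative_dp, iterative_dp_alt, if_pos hlen]
  · have hlen2 : target.toList.length = src.toList.length := by omega
    clear hlen
    have hk : 0 ≤ k := by
      rcases hpre with h | h
      · omega
      · exact h
    obtain ⟨kn, rfl⟩ : ∃ kn : Nat, k = (kn : Int) := ⟨k.toNat, (Int.toNat_of_nonneg hk).symm⟩
    simp only [iterative_dp, iterative_dp_alt, if_neg (by omega : ¬ target.toList.length ≠ src.toList.length),
      if_neg (by omega : ¬ ((kn : Int) < 0))]
    rcases Nat.eq_zero_or_pos src.toList.length with hn0 | hn1
    · -- n = 0 : src = "" and target = ""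
      have hsrc : src = "" := by
        rw [← String.ofList_toList (s := src), List.length_eq_zero_iff.mp hn0]
      have htgt : target = "" := by
        rw [← String.ofList_toList (s := target),
          List.length_eq_zero_iff.mp (show target.toList.length = 0 by omega)]
      rcases Nat.eq_zero_or_pos kn with hkn0 | hkn1
      · exact absurd ⟨hsrc, htgt, by omega⟩ hnd
      · -- A side: the dict is empty, target_idx = -1
        rw [hn0]
        rw [show pvBuildS 0 src.toList PySem.Dict.empty = PySem.Dict.empty from rfl]
        rw [show (PySem.List.enumerate (PySem.Dict.empty (κ := String) (ν := Int)).keys 0).foldl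
            (fun d p => d.insert p.2 p.1) PySem.Dict.empty = PySem.Dict.empty from rfl]
        rw [show (PySem.Dict.empty (κ := String) (ν := Int)).getD target (-1) = -1 from rfl]
        rw [if_pos rfl, if_neg (by omega : ¬ ((kn : Int) = 0))]
        rw [PySem.List.pyRange_one_eq_nil (a := 0) (b := ((0 : Nat) : Int)) (by simp),
          List.foldl_nil]
        rw [pv_mod_eq, pv_mod_eq]
        norm_num
    · -- n ≥ 1
      rw [pvBuildS_counter src.toList.length src.toList]
      set R := pvRots src.toList.length src.toList with hRdef
      have hRlen : R.length = src.toList.length := by rw [hRdef, pvRots_eq]; simp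
      have hsrcmem : String.ofList src.toList ∈ pvKeys R := by
        rw [pvKeys, PySem.Set.mem_ofList, hRdef]
        obtain ⟨nn, hnn⟩ : ∃ nn, src.toList.length = nn + 1 := ⟨src.toList.length - 1, by omega⟩
        rw [hnn, pvRots]
        exact List.mem_cons_self
      rw [String.ofList_toList] at hsrcmem
      have hm : 1 ≤ pvM R := List.length_pos_of_mem hsrcmem
      rw [show (PySem.List.enumerate (PySem.Dict.counter R).keys 0).foldl
          (fun d p => d.insert p.2 p.1) PySem.Dict.empty = pvSTI R from rfl]
      rw [pv_s_items R, pv_s_size R,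
        show ((kn : Int) + 1).toNat = kn + 1 from by omega,
        pv_dp1_eq_mat0 R kn, pv_dp_fold R hm kn kn (le_refl kn)]
      by_cases htgtk : target ∈ pvKeys R
      · -- target is a rotation of src
        set j := (pvKeys R).idxOf target with hjdef
        have hj : j < pvM R := List.idxOf_lt_length_of_mem htgtk
        have hkeyj : (pvKeys R).getD j "" = target := by
          rw [List.getD_eq_getElem?_getD, List.getElem?_eq_getElem hj]
          exact List.getElem_idxOf hj
        have htIdx : (pvSTI R).getD target (-1) = (j : Int) := by
          rw [← hkeyj]; exact pvSTI_getD_pos R j hj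
        rw [htIdx, if_neg (by omega : ¬ ((j : Int) = -1))]
        have hksrc : (pvKeys R).getD 0 "" = src := by
          rw [hRdef, pv_keys_head src.toList src.toList.length hn1, String.ofList_toList]
        have hj0 : j = 0 ↔ target = src := by
          constructor
          · intro h0; rw [← hkeyj, h0, hksrc]
          · intro hts
            obtain ⟨k0, rest, hkeq⟩ : ∃ k0 rest, pvKeys R = k0 :: rest := by
              rcases h : pvKeys R with _ | ⟨k0, rest⟩
              · exfalso; rw [show pvM R = (pvKeys R).length from rfl, h] at hm; simp at hm
              · exact ⟨k0, rest, rfl⟩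
            have hk0 : k0 = src := by
              rw [hkeq] at hksrc; simpa using hksrc
            rw [hjdef, hkeq, hts, hk0, List.idxOf_cons_self]
        have hcnt : pvC R j = (R.count target : Int) := by
          rw [pv_items_snd R j hj, hkeyj]
        rcases Nat.eq_zero_or_pos kn with hkn0 | hkn1
        · -- k = 0 : row 0 of the dp table
          subst hkn0
          rw [if_pos (show ((0 : Nat) : Int) = 0 by simp)]
          have hmat := pv_mat_getD R 0 0 0 (by omega)
          rw [if_pos rfl] at hmat
          rw [hmat]
          simp only [PySem.List.pyGetD_natCast]
          rw [pvRow0, pv_getD_set _ _ _ _ (by simp)]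
          by_cases hts : target = src
          · rw [if_pos hts, if_pos (hj0.mpr hts)]
          · rw [if_neg hts, if_neg (fun h => hts (hj0.mp h)),
              List.getD_replicate 0 (by omega : j < pvM R + 1)]
        · -- k ≥ 1 : closed form row
          rw [if_neg (by omega : ¬ ((kn : Int) = 0))]
          rw [pv_mat_getD R kn kn kn (by omega), if_neg (by omega), if_pos (le_refl kn)]
          simp only [PySem.List.pyGetD_natCast]
          rw [pvRowOf, pv_getD_map_range, if_pos (by omega : j < pvM R + 1), if_pos hj, hcnt]
          rw [pv_cnt_eq src target, ← hRdef, show ((kn : Int) - 1).toNat = kn - 1 from by omega]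
          rw [pv_mod_eq, pv_mod_eq, pv_mod_eq]
          rw [Int.mul_emod, pv_T_modeq R hm (kn - 1), hRlen, ← Int.mul_emod]
          conv_rhs => rw [Int.mul_emod, Int.emod_emod_of_dvd _ dvd_rfl, ← Int.mul_emod]
          rw [Int.mul_comm]
      · -- target is not a rotation of src
        rw [pvSTI_getD_absent R target htgtk, if_pos rfl]
        have hcnt0 : R.count target = 0 := by
          rw [List.count_eq_zero]
          intro hmem
          exact htgtk (by rw [pvKeys, PySem.Set.mem_ofList]; exact hmem)
        rcases Nat.eq_zero_or_pos kn with hkn0 | hkn1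
        · subst hkn0
          rw [if_pos (show ((0 : Nat) : Int) = 0 by simp)]
          have hts : ¬ target = src := fun h => htgtk (h ▸ hsrcmem)
          rw [if_neg hts]
        · rw [if_neg (by omega : ¬ ((kn : Int) = 0)), pv_cnt_eq src target, ← hRdef, hcnt0]
          rw [pv_mod_eq]
          norm_num
theorem iterative_dp_changed : Claim_changed_iterative_dp := by unfold Claim_changed_iterative_dp; decide
theorem iterative_dp_tight : Claim_exact_iterative_dp := by
  unfold Claim_exact_iterative_dp
  intro src target k _ _ hD
  obtain ⟨h1, h2, h3⟩ := hD
  subst h1; subst h2; subst h3; decide
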